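-- pv_equiv track=rewrite | github.com/varunagarwal004/Reduce_LVLMs_Hallucination | dx_llava/DX&LLaVA_main.py | generate_description_prompt
-- ===== SOURCE A (Python) =====
-- from collections import Counter
--
-- def generate_description_prompt(data):
--     category_counts = Counter(obj['category'] for obj in data)
--     sorted_categories = sorted(category_counts.items())
--
--     phrases = []
--     for category, count in sorted_categories:
--         name = category if count == 1 else category + 's'
--         phrases.append(f"{count} {name}")
--
--     if len(phrases) == 1:
--         return f"There is {phrases[0]} in the picture."
--     else:
--         return f"There are {', '.join(phrases[:-1])}, and {phrases[-1]} in the picture."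
-- ===== SOURCE B (Python) =====
-- def generate_description_prompt(data):
--     # Sort the category names, group equal runs recursively, and build the
--     # "a, b, and c" body by direct recursion over the groups (no Counter,
--     # no phrases list, no slicing/negative indexing).
--     cats = sorted(obj['category'] for obj in data)
--
--     def group_runs(rest):
--         if not rest:
--             return []
--         head = rest[0]
--         n = 1
--         while n < len(rest) and rest[n] == head:
--             n += 1
--         return [(head, n)] + group_runs(rest[n:])
--
--     def phrase(cat, n):
--         return f"{n} {cat}" + ("" if n == 1 else "s")
--
--     def join_groups(groups):
--         if not groups:
--             return ""
--         if len(groups) == 1: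
--             return phrase(*groups[0])
--         if len(groups) == 2:
--             return phrase(*groups[0]) + ", and " + phrase(*groups[1])
--         return phrase(*groups[0]) + ", " + join_groups(groups[1:])
--
--     groups = group_runs(cats)
--     if len(groups) == 1:
--         return "There is " + join_groups(groups) + " in the picture."
--     return "There are " + join_groups(groups) + " in the picture."
-- ===== Notes on version B (the rewrite author's own statement) =====
-- stated objective: alternative
-- what changed: B sorts the category names, groups equal runs by recursion over the sorted list, and builds the 'a, b, and c' body by direct recursion over the groups, instead of A's Counter dict + sorted items + phrase list + join/negative-index slicing.
import Mathlib
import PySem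

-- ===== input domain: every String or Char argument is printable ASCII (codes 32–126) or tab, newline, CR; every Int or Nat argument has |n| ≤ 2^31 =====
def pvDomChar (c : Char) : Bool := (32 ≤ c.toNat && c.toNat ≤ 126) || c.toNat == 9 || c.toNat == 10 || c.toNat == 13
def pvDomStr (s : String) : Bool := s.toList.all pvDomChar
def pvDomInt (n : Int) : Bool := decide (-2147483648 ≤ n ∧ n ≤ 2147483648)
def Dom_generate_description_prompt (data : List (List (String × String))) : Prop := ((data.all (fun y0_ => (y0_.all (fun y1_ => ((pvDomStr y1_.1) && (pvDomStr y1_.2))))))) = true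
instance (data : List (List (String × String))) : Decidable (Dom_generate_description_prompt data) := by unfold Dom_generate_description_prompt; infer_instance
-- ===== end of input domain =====

-- B replaces Counter + sorted(items) + phrase list + join/negative-index slicing by recursive
-- run-grouping of the sorted names and a recursive "a, b, and c" join; equivalence is about the
-- RETURN value (neither program mutates its argument).

-- ===== PORT A =====
def generate_description_prompt (data : List (List (String × String))) : String :=
  let category_counts := PySem.Dict.counter (data.map (fun obj => (PySem.Dict.mk obj).getD "category" ""))
  let sorted_categories := PySem.List.sorted2 category_counts.items (fun p => p.1) (fun p => p.2)
  let phrases := sorted_categories.foldl (fun acc p =>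
      let name := if p.2 == 1 then p.1 else p.1 ++ "s"
      acc ++ [PySem.Int.toStr p.2 ++ " " ++ name]) []
  if phrases.length == 1 then
    "There is " ++ PySem.List.pyGetD phrases 0 "" ++ " in the picture."
  else
    "There are " ++ PySem.Str.join ", " (PySem.List.slice phrases none (some (-1))) ++ ", and "
      ++ PySem.List.pyGetD phrases (-1) "" ++ " in the picture."

-- ===== PORT B =====
-- Source B's group_runs: the inner 'while' counts the leading run (n = 1 + equal prefix of the tail),
-- rest[n:] is the dropWhile of that equal prefix
def groupRuns : List String → List (String × Int)
  | [] => []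
  | head :: t =>
    (head, ((t.takeWhile (fun x => x == head)).length : Int) + 1) ::
      groupRuns (t.dropWhile (fun x => x == head))
termination_by l => l.length
decreasing_by
  simpa using Nat.lt_succ_of_le (List.length_dropWhile_le _ _)

-- Source B's phrase: f"{n} {cat}" + ("" if n == 1 else "s")
def phraseOf (cat : String) (n : Int) : String :=
  PySem.Int.toStr n ++ " " ++ cat ++ (if n == 1 then "" else "s")

-- Source B's join_groups: direct recursion, the two-element case inserts ", and "
def joinGroups : List (String × Int) → String
  | [] => ""
  | [g] => phraseOf g.1 g.2
  | [g, h] => phraseOf g.1 g.2 ++ ", and " ++ phraseOf h.1 h.2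
  | g :: rest => phraseOf g.1 g.2 ++ ", " ++ joinGroups rest

def generate_description_prompt_alt (data : List (List (String × String))) : String :=
  let cats := PySem.List.sorted (data.map (fun obj => (PySem.Dict.mk obj).getD "category" "")) (fun x => x)
  let groups := groupRuns cats
  if groups.length == 1 then
    "There is " ++ joinGroups groups ++ " in the picture."
  else
    "There are " ++ joinGroups groups ++ " in the picture."

-- ===== PRECONDITION & SPEC =====
-- Pre_ excludes exactly the inputs where the Python A raises: empty data (IndexError on
-- phrases[-1]) and an object without a 'category' key (KeyError).
def Pre_generate_description_prompt (data : List (List (String × String))) : Prop :=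
  data ≠ [] ∧ ∀ obj ∈ data, ∃ kv ∈ obj, kv.1 = "category"
instance (data : List (List (String × String))) : Decidable (Pre_generate_description_prompt data) := by unfold Pre_generate_description_prompt; infer_instance

def pvWitness_generate_description_prompt : (List (List (String × String))) :=
  [[("category", "dog")], [("category", "cat")], [("category", "dog")]]

def Spec_generate_description_prompt (data : List (List (String × String))) (out : String) : Prop := out = generate_description_prompt_alt data
instance (data : List (List (String × String))) (out : String) : Decidable (Spec_generate_description_prompt data out) := by unfold Spec_generate_description_prompt; infer_instance

-- ===== CLAIM (what is proved, stated in full; the proofs are below) =====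
def Claim_equal_generate_description_prompt : Prop := ∀ (data : List (List (String × String))), Dom_generate_description_prompt data → Pre_generate_description_prompt data → Spec_generate_description_prompt data (generate_description_prompt data)

-- ===== LEMMAS AND PROOFS =====

-- insertBy only looks at comparisons of the inserted element with list elements
theorem insertBy_congr {α : Type} (f g : α → α → Bool) (x : α) (ys : List α)
    (h : ∀ y ∈ ys, f x y = g x y) :
    PySem.List.insertBy f x ys = PySem.List.insertBy g x ys := by
  induction ys with
  | nil => rfl
  | cons y ys ih =>
    simp only [PySem.List.insertBy]
    rw [h y (by simp)]
    by_cases hg : g x y = true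
    · simp [hg]
    · simp only [Bool.not_eq_true] at hg
      simp [hg, ih (fun z hz => h z (by simp [hz]))]

theorem foldl_insertBy_congr {α : Type} (f g : α → α → Bool) (xs acc : List α)
    (h : ∀ a ∈ xs, ∀ b, (b ∈ acc ∨ b ∈ xs) → f a b = g a b) :
    xs.foldl (fun acc x => PySem.List.insertBy f x acc) acc
      = xs.foldl (fun acc x => PySem.List.insertBy g x acc) acc := by
  induction xs generalizing acc with
  | nil => rfl
  | cons x xs ih =>
    simp only [List.foldl_cons]
    rw [insertBy_congr f g x acc (fun y hy => h x (by simp) y (Or.inl hy))]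
    exact ih _ (fun a ha b hb => h a (by simp [ha]) b (by
      rcases hb with hb | hb
      · rcases (PySem.List.mem_insertBy _ _ _ _).1 hb with hb | hb
        · simp [hb]
        · exact Or.inl hb
      · simp [hb]))

-- when the primary key separates the elements, the tuple-key sort is the primary-key sort
theorem sorted2_eq_sorted {α κ₁ κ₂ : Type} [LinearOrder κ₁] [LinearOrder κ₂]
    (xs : List α) (k1 : α → κ₁) (k2 : α → κ₂)
    (hinj : ∀ a ∈ xs, ∀ b ∈ xs, k1 a = k1 b → a = b) :
    PySem.List.sorted2 xs k1 k2 = PySem.List.sorted xs k1 := by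
  simp only [PySem.List.sorted2, PySem.List.sorted, if_neg (by decide : ¬ (false = true))]
  apply foldl_insertBy_congr
  intro a ha b hb
  rcases hb with hb | hb
  · exact absurd hb (List.not_mem_nil)
  rcases lt_trichotomy (k1 a) (k1 b) with hlt | heq | hgt
  · simp [hlt]
  · rw [hinj a ha b hb heq]
    simp
  · simp [hgt, not_lt_of_gt hgt]

-- on a ≤-sorted list every element after the dropped equal prefix is strictly larger
theorem dropWhile_head_lt (head : String) (t : List String)
    (hle : ∀ x ∈ t, head ≤ x) (hst : t.Pairwise (· ≤ ·)) :
    ∀ x ∈ t.dropWhile (fun x => x == head), head < x := by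
  induction t with
  | nil => simp
  | cons a t ih =>
    by_cases ha : (a == head) = true
    · rw [List.dropWhile_cons, if_pos ha]
      exact ih (fun x hx => hle x (by simp [hx])) ((List.pairwise_cons.1 hst).2)
    · rw [List.dropWhile_cons, if_neg ha]
      intro x hx
      have hah : head < a :=
        lt_of_le_of_ne (hle a (by simp)) (fun h => ha (by rw [h]; exact beq_self_eq_true a))
      rcases List.mem_cons.1 hx with rfl | hx
      · exact hah
      · exact lt_of_lt_of_le hah ((List.pairwise_cons.1 hst).1 x hx)

-- run-length grouping of a ≤-sorted list: entries are (key, total count), keys strictly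
-- increasing, and the keys are exactly the members of the list
theorem groupRuns_spec (l : List String) (hs : l.Pairwise (· ≤ ·)) :
    groupRuns l = ((groupRuns l).map Prod.fst).map (fun k => (k, (l.count k : Int)))
    ∧ ((groupRuns l).map Prod.fst).Pairwise (· < ·)
    ∧ ∀ k, k ∈ (groupRuns l).map Prod.fst ↔ k ∈ l := by
  induction l using groupRuns.induct with
  | case1 => simp [groupRuns]
  | case2 head t ih =>
    have hsplit : t.takeWhile (fun x => x == head) ++ t.dropWhile (fun x => x == head) = t :=
      List.takeWhile_append_dropWhile
    have hle : ∀ x ∈ t, head ≤ x := (List.pairwise_cons.1 hs).1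
    have hst : t.Pairwise (· ≤ ·) := (List.pairwise_cons.1 hs).2
    have ht1eq : ∀ x ∈ t.takeWhile (fun x => x == head), x = head := by
      intro x hx
      simpa using List.mem_takeWhile_imp hx
    have hst2 : (t.dropWhile (fun x => x == head)).Pairwise (· ≤ ·) :=
      hst.sublist (List.dropWhile_sublist _)
    have hgt : ∀ x ∈ t.dropWhile (fun x => x == head), head < x :=
      dropWhile_head_lt head t hle hst
    have hcount_head :
        (head :: t).count head = (t.takeWhile (fun x => x == head)).length + 1 := by
      have h1 : (t.takeWhile (fun x => x == head)).count head
          = (t.takeWhile (fun x => x == head)).length := by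
        rw [List.count_eq_length]
        intro b hb
        exact (ht1eq b hb).symm
      have h2 : (t.dropWhile (fun x => x == head)).count head = 0 := by
        rw [List.count_eq_zero]
        intro hmem
        exact absurd (hgt head hmem) (lt_irrefl head)
      have h3 : List.count head t = (t.takeWhile (fun x => x == head)).length := by
        conv_lhs => rw [← hsplit]
        rw [List.count_append, h1, h2]
        omega
      rw [List.count_cons_self, h3]
    have hcount_t2 : ∀ k ∈ t.dropWhile (fun x => x == head),
        (head :: t).count k = (t.dropWhile (fun x => x == head)).count k := by
      intro k hk
      have hkh : head < k := hgt k hk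
      have h1 : (t.takeWhile (fun x => x == head)).count k = 0 := by
        rw [List.count_eq_zero]
        intro hmem
        have hkeq := ht1eq k hmem
        rw [hkeq] at hkh
        exact lt_irrefl head hkh
      have h3 : List.count k t = List.count k (t.dropWhile (fun x => x == head)) := by
        conv_lhs => rw [← hsplit]
        rw [List.count_append, h1]
        simp
      have hne : head ≠ k := fun h => absurd (h ▸ hkh) (lt_irrefl k)
      rw [List.count_cons_of_ne hne, h3]
    obtain ⟨ih1, ih2, ih3⟩ := ih hst2
    have hgr : groupRuns (head :: t)
        = (head, ((t.takeWhile (fun x => x == head)).length : Int) + 1)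
          :: groupRuns (t.dropWhile (fun x => x == head)) := by
      rw [groupRuns]
    refine ⟨?_, ?_, ?_⟩
    · rw [hgr]
      simp only [List.map_cons, List.map_map]
      refine congrArg₂ _ (by rw [hcount_head]; push_cast; ring_nf) ?_
      conv_lhs => rw [ih1]
      simp only [List.map_map]
      apply List.map_congr_left
      intro p hp
      have hpt2 : p.1 ∈ t.dropWhile (fun x => x == head) :=
        (ih3 p.1).1 (List.mem_map_of_mem hp)
      simp [Function.comp, hcount_t2 p.1 hpt2]
    · rw [hgr]
      simp only [List.map_cons, List.pairwise_cons]
      exact ⟨fun k hk => hgt k ((ih3 k).1 hk), ih2⟩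
    · intro k
      rw [hgr]
      simp only [List.map_cons, List.mem_cons]
      constructor
      · rintro (rfl | hk)
        · simp
        · exact Or.inr ((hsplit ▸ List.mem_append_right _ ((ih3 k).1 hk)))
      · rintro (rfl | hk)
        · left; rfl
        · rw [← hsplit] at hk
          rcases List.mem_append.1 hk with hk | hk
          · left; exact ht1eq k hk
          · right; exact (ih3 k).2 hk

-- the heart of the counting equivalence: sorted counter items = run-length groups of the sorted list
theorem counter_sorted2_eq_groupRuns (l : List String) :
    PySem.List.sorted2 (PySem.Dict.counter l).items (fun p => p.1) (fun p => p.2)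
      = groupRuns (PySem.List.sorted l (fun x => x)) := by
  set scats := PySem.List.sorted l (fun x => x) with hscats
  have hperm : scats.Perm l := PySem.List.sorted_perm l _ _
  have hp : scats.Pairwise (· ≤ ·) := by
    have := PySem.List.sorted_pairwise l (fun x => x)
    simpa [← hscats] using this
  obtain ⟨h1, h2, h3⟩ := groupRuns_spec scats hp
  set K := (groupRuns scats).map Prod.fst with hK
  have hKnodup : K.Nodup := h2.imp ne_of_lt
  have hLB : groupRuns scats = K.map (fun k => (k, (l.count k : Int))) := by
    rw [h1]
    apply List.map_congr_left
    intro k _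
    simp [hperm.count_eq]
  have hSnodup : (PySem.Set.ofList l).Nodup := PySem.Set.nodup_ofList l
  have hmemS : ∀ k, k ∈ K ↔ k ∈ PySem.Set.ofList l := by
    intro k
    rw [h3 k, PySem.Set.mem_ofList, hperm.mem_iff]
  have hKS : K.Perm (PySem.Set.ofList l) := by
    apply List.perm_of_nodup_nodup_toFinset_eq hKnodup hSnodup
    ext k
    simp [List.mem_toFinset, hmemS k]
  have hitems : (PySem.Dict.counter l).items
      = (PySem.Set.ofList l).map (fun k => (k, (l.count k : Int))) := by
    simpa using PySem.Dict.items_counter l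
  have hpermItems : (groupRuns scats).Perm (PySem.Dict.counter l).items := by
    rw [hLB, hitems]
    exact hKS.map _
  have hpairs : (groupRuns scats).Pairwise (fun a b => a.1 < b.1) := by
    rw [hLB]
    rw [List.pairwise_map]
    exact h2
  have hinj : ∀ a ∈ (PySem.Dict.counter l).items, ∀ b ∈ (PySem.Dict.counter l).items,
      a.1 = b.1 → a = b := by
    intro a ha b hb hab
    rw [hitems] at ha hb
    obtain ⟨ka, -, rfl⟩ := List.mem_map.1 ha
    obtain ⟨kb, -, rfl⟩ := List.mem_map.1 hb
    simp only at hab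
    rw [hab]
  rw [sorted2_eq_sorted _ _ _ hinj]
  exact PySem.List.sorted_eq_of_perm_of_pairwise_lt _ _ _ hpermItems hpairs

-- A's per-pair phrase equals B's phraseOf
theorem phrase_eq (p : String × Int) :
    PySem.Int.toStr p.2 ++ " " ++ (if p.2 == 1 then p.1 else p.1 ++ "s") = phraseOf p.1 p.2 := by
  unfold phraseOf
  by_cases h : p.2 == 1
  · simp [h]
  · simp [h, String.append_assoc]

-- Python's ", ".join on a two-or-more list, one step
theorem join_comma_cons_cons (x y : String) (t : List String) :
    PySem.Str.join ", " (x :: y :: t) = x ++ ", " ++ PySem.Str.join ", " (y :: t) := by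
  simp [PySem.Str.join, PySem.Chars.join_cons_cons, String.ofList_append, String.append_assoc]
  conv_rhs => rw [show (", " : String) = String.ofList [',', ' '] from rfl]
  rw [← String.ofList_append]
  rfl

-- A's join of all-but-last plus ", and " plus last equals B's recursive join (≥ 2 groups)
theorem join_dropLast_getLast (g h : String × Int) (rest : List (String × Int)) :
    PySem.Str.join ", " (((g :: h :: rest).map (fun p => phraseOf p.1 p.2)).dropLast)
      ++ ", and " ++ ((g :: h :: rest).map (fun p => phraseOf p.1 p.2)).getLast (by simp)
    = joinGroups (g :: h :: rest) := by
  induction rest generalizing g h with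
  | nil =>
    simp [joinGroups, PySem.Str.join]
  | cons r rs ih =>
    have hrec : joinGroups (g :: h :: r :: rs)
        = phraseOf g.1 g.2 ++ ", " ++ joinGroups (h :: r :: rs) := by
      rw [joinGroups] <;> simp
    rw [hrec, ← ih h r]
    have hdl : ((g :: h :: r :: rs).map (fun p => phraseOf p.1 p.2)).dropLast
        = phraseOf g.1 g.2 :: ((h :: r :: rs).map (fun p => phraseOf p.1 p.2)).dropLast := by
      simp [List.dropLast_cons_of_ne_nil]
    have hgl : ((g :: h :: r :: rs).map (fun p => phraseOf p.1 p.2)).getLast (by simp)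
        = ((h :: r :: rs).map (fun p => phraseOf p.1 p.2)).getLast (by simp) := by
      simp [List.getLast_cons]
    rw [hdl, hgl]
    have hne : ((h :: r :: rs).map (fun p => phraseOf p.1 p.2)).dropLast ≠ [] := by
      simp [List.dropLast_cons_of_ne_nil]
    rcases hx : ((h :: r :: rs).map (fun p => phraseOf p.1 p.2)).dropLast with _ | ⟨x, t⟩
    · exact absurd hx hne
    · rw [hx, join_comma_cons_cons]
      simp [String.append_assoc]

-- ===== VERDICT (by name: the statement is the Claim_ definition above) =====
theorem generate_description_prompt_spec : Claim_equal_generate_description_prompt := by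
  intro data _ hpre
  unfold Spec_generate_description_prompt generate_description_prompt generate_description_prompt_alt
  simp only [counter_sorted2_eq_groupRuns, PySem.List.foldl_append_singleton_eq_map]
  simp only [phrase_eq]
  set gs := groupRuns (PySem.List.sorted (data.map (fun obj => (PySem.Dict.mk obj).getD "category" "")) (fun x => x)) with hgs
  rcases hcase : gs with _ | ⟨g, _ | ⟨h, rest⟩⟩
  · exfalso
    rcases hpre with ⟨hne, -⟩
    rcases data with _ | ⟨d, ds⟩
    · exact hne rfl
    · have : gs ≠ [] := by
        rw [hgs]
        rcases hx : PySem.List.sorted ((d :: ds).map (fun obj => (PySem.Dict.mk obj).getD "category" "")) (fun x => x) with _ | ⟨a, t⟩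
        · have := PySem.List.sorted_perm ((d :: ds).map (fun obj => (PySem.Dict.mk obj).getD "category" "")) (fun x => x) false
          rw [hx] at this
          simp at this
        · simp [groupRuns]
      exact this hcase
  · simp [joinGroups, PySem.List.pyGetD]
  · have hlen : ((g :: h :: rest).map (fun p => phraseOf p.1 p.2)).length ≠ 1 := by simp
    rw [if_neg (by simp), if_neg (by simp)]
    rw [PySem.List.slice_to_neg_one, PySem.List.pyGetD_neg_one _ _ (by simp)]
    rw [← join_dropLast_getLast g h rest]
    simp [String.append_assoc]
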